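-- pv_equiv track=rewrite | github.com/Waqas01CP/fyp-career-guidance | backend/app/agents/nodes/profiler.py | _interpret_riasec
-- ===== SOURCE A (Python) =====
-- def _interpret_riasec(riasec: dict) -> str:
--     """Convert RIASEC scores to a counsellor-readable summary.
--     Never exposed directly to the student."""
--     if not riasec:
--         return "not yet assessed"
--     sorted_dims = sorted(riasec.items(), key=lambda x: x[1], reverse=True)
--     top2 = sorted_dims[:2]
--     dim_names = {
--         "R": "hands-on/technical",
--         "I": "analytical/investigative",
--         "A": "creative/artistic",
--         "S": "people-oriented/social",
--         "E": "leadership/entrepreneurial",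
--         "C": "organised/systematic",
--     }
--     descriptions = [dim_names.get(d, d) for d, _ in top2]
--     return f"primarily {' and '.join(descriptions)}"
-- ===== SOURCE B (Python) =====
-- def _interpret_riasec(riasec: dict) -> str:
--     """Convert RIASEC scores to a counsellor-readable summary.
--     Never exposed directly to the student."""
--     if not riasec:
--         return "not yet assessed"
--     best = None
--     second = None
--     for d, v in riasec.items():
--         if best is None or v > best[1]:
--             best, second = (d, v), best
--         elif second is None or v > second[1]:
--             second = (d, v)
--     dim_names = {
--         "R": "hands-on/technical",
--         "I": "analytical/investigative",
--         "A": "creative/artistic",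
--         "S": "people-oriented/social",
--         "E": "leadership/entrepreneurial",
--         "C": "organised/systematic",
--     }
--     top2 = [best] if second is None else [best, second]
--     descriptions = [dim_names.get(d, d) for d, _ in top2]
--     return "primarily " + " and ".join(descriptions)
-- ===== Notes on version B (the rewrite author's own statement) =====
-- stated objective: alternative
-- what changed: Replaces the full stable sort + [:2] slice with a single pass that maintains the two highest-scoring (key,value) pairs; strict '>' comparisons reproduce the stable sort's first-seen tie order.
import Mathlib
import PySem

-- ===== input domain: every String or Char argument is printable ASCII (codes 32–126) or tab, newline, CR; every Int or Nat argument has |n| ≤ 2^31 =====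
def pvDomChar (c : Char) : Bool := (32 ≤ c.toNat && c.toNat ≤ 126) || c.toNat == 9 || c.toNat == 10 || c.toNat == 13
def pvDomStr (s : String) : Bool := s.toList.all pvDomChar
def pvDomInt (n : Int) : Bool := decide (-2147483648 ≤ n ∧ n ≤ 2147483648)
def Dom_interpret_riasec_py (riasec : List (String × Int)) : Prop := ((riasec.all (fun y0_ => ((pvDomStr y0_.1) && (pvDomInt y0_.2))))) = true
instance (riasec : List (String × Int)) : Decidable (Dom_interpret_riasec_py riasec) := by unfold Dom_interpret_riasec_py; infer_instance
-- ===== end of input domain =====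

-- B replaces A's full stable sort + [:2] slice by a single pass keeping the two best pairs (alternative algorithm, same behaviour).

-- shared literal data: the dim_names mapping both Pythons define verbatim
def pvDimNames : PySem.Dict String String :=
  PySem.Dict.ofList
    [("R", "hands-on/technical"),
     ("I", "analytical/investigative"),
     ("A", "creative/artistic"),
     ("S", "people-oriented/social"),
     ("E", "leadership/entrepreneurial"),
     ("C", "organised/systematic")]

-- ===== PORT A =====
def interpret_riasec_py (riasec : List (String × Int)) : String :=
  if riasec = [] then "not yet assessed"
  else
    let sorted_dims := PySem.List.sorted riasec (fun x => x.2) true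
    let top2 := PySem.List.slice sorted_dims none (some 2)
    let descriptions := top2.map (fun p => pvDimNames.getD p.1 p.1)
    "primarily " ++ PySem.Str.join " and " descriptions

-- ===== PORT B =====
-- one loop step: 'if best is None or v > best[1]: best, second = (d,v), best; elif second is None or v > second[1]: second = (d,v)'
def pvTop2Step (acc : Option (String × Int) × Option (String × Int)) (dv : String × Int) :
    Option (String × Int) × Option (String × Int) :=
  match acc.1 with
  | none => (some dv, acc.1)
  | some b =>
    if b.2 < dv.2 then (some dv, acc.1)
    else
      match acc.2 with
      | none => (acc.1, some dv)
      | some s => if s.2 < dv.2 then (acc.1, some dv) else acc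

def interpret_riasec_py_alt (riasec : List (String × Int)) : String :=
  if riasec = [] then "not yet assessed"
  else
    let st := riasec.foldl pvTop2Step (none, none)
    let top2 : List (String × Int) :=
      match st with
      | (some b, some s) => [b, s]
      | (some b, none) => [b]
      | (none, _) => []
    let descriptions := top2.map (fun p => pvDimNames.getD p.1 p.1)
    "primarily " ++ PySem.Str.join " and " descriptions

-- ===== PRECONDITION & SPEC =====
def Spec_interpret_riasec_py (riasec : List (String × Int)) (out : String) : Prop := out = interpret_riasec_py_alt riasec
instance (riasec : List (String × Int)) (out : String) : Decidable (Spec_interpret_riasec_py riasec out) := by unfold Spec_interpret_riasec_py; infer_instance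

-- ===== CLAIM (what is proved, stated in full; the proofs are below) =====
def Claim_equal_interpret_riasec_py : Prop := ∀ (riasec : List (String × Int)), Dom_interpret_riasec_py riasec → Spec_interpret_riasec_py riasec (interpret_riasec_py riasec)

-- ===== LEMMAS AND PROOFS =====

-- abstraction of B's state to the list the ports read off it
def pvTop2 (st : Option (String × Int) × Option (String × Int)) : List (String × Int) :=
  match st with
  | (some b, some s) => [b, s]
  | (some b, none) => [b]
  | (none, _) => []

-- how 'take 2' of a stable descending insertion changes, as a function of the old 'take 2'
def pvG (l : List (String × Int)) (x : String × Int) : List (String × Int) :=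
  match l with
  | [] => [x]
  | [y] => if y.2 < x.2 then [x, y] else [y, x]
  | y :: z :: _ => if y.2 < x.2 then [x, y] else if z.2 < x.2 then [y, x] else [y, z]

def pvWF (st : Option (String × Int) × Option (String × Int)) : Prop := st.1 = none → st.2 = none

theorem pv_take2_insertBy (x : String × Int) (l : List (String × Int)) :
    (PySem.List.insertBy (fun a b => decide ((b.2 : Int) < a.2)) x l).take 2 = pvG (l.take 2) x := by
  match l with
  | [] => simp [PySem.List.insertBy, pvG]
  | [y] =>
    simp only [PySem.List.insertBy, pvG]
    split_ifs with h <;> simp_all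
  | y :: z :: t =>
    simp only [PySem.List.insertBy, pvG]
    split_ifs with h1 h2 <;> simp_all <;>
      rw [if_neg (by omega), if_neg (by omega)]

theorem pv_step_abs (st : Option (String × Int) × Option (String × Int)) (x : String × Int)
    (hwf : pvWF st) : pvTop2 (pvTop2Step st x) = pvG (pvTop2 st) x ∧ pvWF (pvTop2Step st x) := by
  obtain ⟨b, s⟩ := st
  cases b with
  | none =>
    have hs : s = none := hwf rfl
    subst hs
    simp [pvTop2Step, pvTop2, pvG, pvWF]
  | some b =>
    cases s with
    | none =>
      simp only [pvTop2Step, pvTop2, pvG, pvWF]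
      split_ifs <;> simp
    | some s =>
      simp only [pvTop2Step, pvTop2, pvG, pvWF]
      split_ifs <;> simp

theorem pv_fold_abs (xs : List (String × Int)) (st : Option (String × Int) × Option (String × Int))
    (acc : List (String × Int)) (hwf : pvWF st) (habs : pvTop2 st = acc.take 2) :
    pvTop2 (xs.foldl pvTop2Step st) =
      (xs.foldl (fun a x => PySem.List.insertBy (fun a b => decide ((b.2 : Int) < a.2)) x a) acc).take 2 := by
  induction xs generalizing st acc with
  | nil => simpa using habs
  | cons x xs ih =>
    obtain ⟨h1, h2⟩ := pv_step_abs st x hwf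
    exact ih (pvTop2Step st x) _ h2 (by rw [h1, habs, pv_take2_insertBy])

-- ===== VERDICT (by name: the statement is the Claim_ definition above) =====
theorem interpret_riasec_py_spec : Claim_equal_interpret_riasec_py := by
  intro riasec _
  unfold Spec_interpret_riasec_py interpret_riasec_py interpret_riasec_py_alt
  by_cases h : riasec = []
  · simp [h]
  · simp only [h]
    have hsort : PySem.List.slice (PySem.List.sorted riasec (fun x => x.2) true) none (some 2)
        = pvTop2 (riasec.foldl pvTop2Step (none, none)) := by
      have h2 : (2 : Int) = ((2 : Nat) : Int) := by norm_num
      rw [h2, PySem.List.slice_to_natCast, PySem.List.sorted_rev_eq_foldl_insertBy]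
      exact (pv_fold_abs riasec (none, none) [] (fun _ => rfl) rfl).symm
    rw [hsort]
    rcases hst : riasec.foldl pvTop2Step (none, none) with ⟨b, s⟩
    cases b <;> cases s <;> simp [pvTop2]
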